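-- pv_equiv track=rewrite | github.com/iclalsonmez/lossless-bmp-rle-compression | main.py | zigzag_coords_for_block
-- ===== SOURCE A (Python) =====
-- from typing import List, Tuple, Dict
--
-- def zigzag_coords_for_block(block_w: int, block_h: int) -> List[Tuple[int, int]]:
--     coords = []
--     for s in range(block_w + block_h - 1):
--         diag = []
--         y_start = max(0, s - (block_w - 1))
--         y_end = min(block_h - 1, s)
--         for y in range(y_start, y_end + 1):
--             x = s - y
--             if 0 <= x < block_w:
--                 diag.append((y, x))
--         if s % 2 == 0:
--             diag.reverse()
--         coords.extend(diag)
--     return coords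
-- ===== SOURCE B (Python) =====
-- from typing import List, Tuple
--
-- def zigzag_coords_for_block(block_w: int, block_h: int) -> List[Tuple[int, int]]:
--     if block_w <= 0 or block_h <= 0:
--         return []
--     coords = []
--     y, x, up = 0, 0, True
--     for _ in range(block_w * block_h):
--         coords.append((y, x))
--         if up:
--             if x == block_w - 1:
--                 y += 1
--                 up = False
--             elif y == 0:
--                 x += 1
--                 up = False
--             else:
--                 y -= 1
--                 x += 1
--         else:
--             if y == block_h - 1:
--                 x += 1
--                 up = True
--             elif x == 0:
--                 y += 1
--                 up = True
--             else:
--                 y += 1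
--                 x -= 1
--     return coords
-- ===== Notes on version B (the rewrite author's own statement) =====
-- stated objective: alternative
-- what changed: Replaces A's per-diagonal bound arithmetic (outer loop over diagonals with max/min start/end indices and a reverse on even diagonals) by a single incremental zigzag walk that keeps a current position and a direction flag and reflects off the block's walls.
import Mathlib
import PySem

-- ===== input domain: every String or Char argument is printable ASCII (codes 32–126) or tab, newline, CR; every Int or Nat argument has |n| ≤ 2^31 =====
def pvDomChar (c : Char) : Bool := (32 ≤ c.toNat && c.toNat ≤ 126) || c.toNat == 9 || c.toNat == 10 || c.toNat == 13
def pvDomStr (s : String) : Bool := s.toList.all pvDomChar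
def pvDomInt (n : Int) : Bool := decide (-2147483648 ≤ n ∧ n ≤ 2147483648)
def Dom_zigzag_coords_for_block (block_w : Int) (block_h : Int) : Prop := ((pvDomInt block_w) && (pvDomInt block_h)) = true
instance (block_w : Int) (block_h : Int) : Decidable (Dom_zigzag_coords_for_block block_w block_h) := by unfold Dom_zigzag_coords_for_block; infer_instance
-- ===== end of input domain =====

-- B replaces A's per-diagonal bound arithmetic by the incremental zigzag walk (position + direction flag); same output, alternative algorithm.


-- ===== PORT A =====
def zigzag_coords_for_block (block_w : Int) (block_h : Int) : List (Int × Int) :=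
  (PySem.List.pyRange 0 (block_w + block_h - 1) 1).foldl (fun coords s =>
    let y_start := max 0 (s - (block_w - 1))
    let y_end := min (block_h - 1) s
    let diag := (PySem.List.pyRange y_start (y_end + 1) 1).foldl (fun diag y =>
      let x := s - y
      if 0 ≤ x ∧ x < block_w then diag ++ [(y, x)] else diag) []
    let diag := if PySem.Int.mod s 2 == 0 then diag.reverse else diag
    coords ++ diag) []

-- ===== PORT B =====
-- fuel-indexed transcription of Source B's `for _ in range(block_w*block_h)` walk
def zigzagWalk (w h : Int) : Nat → Int → Int → Bool → List (Int × Int)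
  | 0, _, _, _ => []
  | n + 1, y, x, up =>
    (y, x) ::
      (if up then
        if x = w - 1 then zigzagWalk w h n (y + 1) x false
        else if y = 0 then zigzagWalk w h n y (x + 1) false
        else zigzagWalk w h n (y - 1) (x + 1) true
      else
        if y = h - 1 then zigzagWalk w h n y (x + 1) true
        else if x = 0 then zigzagWalk w h n (y + 1) x true
        else zigzagWalk w h n (y + 1) (x - 1) false)

def zigzag_coords_for_block_alt (block_w : Int) (block_h : Int) : List (Int × Int) :=
  if block_w ≤ 0 ∨ block_h ≤ 0 then []
  else zigzagWalk block_w block_h (block_w * block_h).toNat 0 0 true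

-- ===== PRECONDITION & SPEC =====
def Spec_zigzag_coords_for_block (block_w : Int) (block_h : Int) (out : List (Int × Int)) : Prop := out = zigzag_coords_for_block_alt block_w block_h
instance (block_w : Int) (block_h : Int) (out : List (Int × Int)) : Decidable (Spec_zigzag_coords_for_block block_w block_h out) := by unfold Spec_zigzag_coords_for_block; infer_instance

-- ===== CLAIM (what is proved, stated in full; the proofs are below) =====
def Claim_equal_zigzag_coords_for_block : Prop := ∀ (block_w : Int) (block_h : Int), Dom_zigzag_coords_for_block block_w block_h → Spec_zigzag_coords_for_block block_w block_h (zigzag_coords_for_block block_w block_h)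

-- ===== LEMMAS AND PROOFS =====

-- a segment of the anti-diagonal y + x = c: cells (t, c - t) for t ∈ [a, b)
def dseg (a b c : Int) : List (Int × Int) :=
  (PySem.List.pyRange a b 1).map (fun t => (t, c - t))

-- the diagonal s of the W×H block, in A's order (reversed when s is even)
def diagSpec (w h s : Int) : List (Int × Int) :=
  if s % 2 = 0 then (dseg (max 0 (s - (w - 1))) (min (h - 1) s + 1) s).reverse
  else dseg (max 0 (s - (w - 1))) (min (h - 1) s + 1) s

-- the part of diagonal y+x still to be emitted when the walk stands at (y, x)
def restDiag (w h y x : Int) : List (Int × Int) :=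
  if (y + x) % 2 = 0 then (dseg (max 0 (y + x - (w - 1))) (y + 1) (y + x)).reverse
  else dseg y (min (h - 1) (y + x) + 1) (y + x)

-- everything still to be emitted from position (y, x)
def restAll (w h y x : Int) : List (Int × Int) :=
  restDiag w h y x ++ (PySem.List.pyRange (y + x + 1) (w + h - 1) 1).flatMap (diagSpec w h)

lemma dseg_congr {a b c a' b' c' : Int} (h1 : a = a') (h2 : b = b') (h3 : c = c') :
    dseg a b c = dseg a' b' c' := by subst h1; subst h2; subst h3; rfl

lemma dseg_empty {a b : Int} (c : Int) (hab : b ≤ a) : dseg a b c = [] := by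
  simp [dseg, PySem.List.pyRange_one_eq_nil hab]

lemma dseg_cons {a b : Int} (c : Int) (hab : a < b) :
    dseg a b c = (a, c - a) :: dseg (a + 1) b c := by
  simp [dseg, PySem.List.pyRange_one_cons hab]

lemma dseg_snoc {a b : Int} (c : Int) (hab : a ≤ b) :
    dseg a (b + 1) c = dseg a b c ++ [(b, c - b)] := by
  simp [dseg, PySem.List.pyRange_one_succ_right hab]

lemma restAll_head_even (w h y x : Int) (E : (y + x) % 2 = 0)
    (hlo : max 0 (y + x - (w - 1)) ≤ y) :
    restAll w h y x = (y, x) ::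
      ((dseg (max 0 (y + x - (w - 1))) y (y + x)).reverse ++
        (PySem.List.pyRange (y + x + 1) (w + h - 1) 1).flatMap (diagSpec w h)) := by
  rw [restAll, restDiag, if_pos E, dseg_snoc _ hlo, List.reverse_append]
  rw [show y + x - y = x by ring]
  simp

lemma restAll_head_odd (w h y x : Int) (O : ¬ (y + x) % 2 = 0)
    (hm : y < min (h - 1) (y + x) + 1) :
    restAll w h y x = (y, x) ::
      (dseg (y + 1) (min (h - 1) (y + x) + 1) (y + x) ++
        (PySem.List.pyRange (y + x + 1) (w + h - 1) 1).flatMap (diagSpec w h)) := by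
  rw [restAll, restDiag, if_neg O, dseg_cons _ hm]
  rw [show y + x - y = x by ring]
  simp

lemma A_eq_flatMap (w h : Int) :
    zigzag_coords_for_block w h = (PySem.List.pyRange 0 (w + h - 1) 1).flatMap (diagSpec w h) := by
  unfold zigzag_coords_for_block
  rw [List.foldl_ext (g := fun coords s => coords ++ diagSpec w h s)]
  · rw [PySem.List.foldl_append_eq_flatMap, List.nil_append]
  · intro acc s hs
    simp only []
    rw [PySem.List.foldl_append_ite]
    rw [List.filter_eq_self.mpr ?_ ]
    · rw [PySem.Int.mod_eq_emod_of_pos (by norm_num)]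
      simp [diagSpec, dseg]
    · intro y hy
      rw [PySem.List.mem_pyRange_one] at hy
      simp only [decide_eq_true_eq]
      omega

lemma flatMap_nil_of_degenerate (w h : Int) (hwh : w ≤ 0 ∨ h ≤ 0) :
    (PySem.List.pyRange 0 (w + h - 1) 1).flatMap (diagSpec w h) = [] := by
  refine List.flatMap_eq_nil_iff.mpr ?_
  intro s _
  have hnil : dseg (max 0 (s - (w - 1))) (min (h - 1) s + 1) s = [] :=
    dseg_empty _ (by omega)
  simp [diagSpec, hnil]

lemma sum_dlen (w : Int) (hw : 0 < w) : ∀ h : Int, 1 ≤ h →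
    ((PySem.List.pyRange 0 (w + h - 1) 1).map
      (fun s => min (h - 1) s + 1 - max 0 (s - (w - 1)))).sum = w * h := by
  intro h hh
  induction h, hh using Int.le_induction with
  | base =>
    rw [List.map_congr_left (g := fun _ => (1 : Int)) ?_]
    · simp only [PySem.List.sum_map_const_int, PySem.List.length_pyRange_one]
      omega
    · intro s hs
      rw [PySem.List.mem_pyRange_one] at hs
      simp only []
      omega
  | succ h hh ih =>
    have e1 : w + (h + 1) - 1 = (w + h - 1) + 1 := by ring
    rw [e1, PySem.List.pyRange_one_succ_right (by omega), List.map_append, List.sum_append]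
    have elast : (List.map (fun s => min (h + 1 - 1) s + 1 - max 0 (s - (w - 1))) [w + h - 1]).sum = 1 := by
      simp only [List.map_cons, List.map_nil, List.sum_cons, List.sum_nil]
      omega
    rw [elast]
    rw [List.map_congr_left
        (g := fun s => (min (h - 1) s + 1 - max 0 (s - (w - 1))) + (if h ≤ s then 1 else 0)) ?_]
    · rw [PySem.List.sum_map_add_int, ih]
      have hsplit : PySem.List.pyRange 0 (w + h - 1) 1 =
          PySem.List.pyRange 0 h 1 ++ PySem.List.pyRange h (w + h - 1) 1 :=
        PySem.List.pyRange_one_append 0 h (w + h - 1) (by omega) (by omega)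
      rw [hsplit, List.map_append, List.sum_append]
      have hsum0 : (List.map (fun s => if h ≤ s then (1:Int) else 0) (PySem.List.pyRange 0 h 1)).sum = 0 := by
        rw [List.map_congr_left (g := fun _ => (0 : Int)) ?_]
        · simp only [PySem.List.sum_map_const_int]
          ring
        · intro s hs; rw [PySem.List.mem_pyRange_one] at hs; simp only []
          rw [if_neg (by omega)]
      have hsum1 : (List.map (fun s => if h ≤ s then (1:Int) else 0) (PySem.List.pyRange h (w + h - 1) 1)).sum = w - 1 := by
        rw [List.map_congr_left (g := fun _ => (1 : Int)) ?_]
        · simp only [PySem.List.sum_map_const_int, PySem.List.length_pyRange_one]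
          omega
        · intro s hs; rw [PySem.List.mem_pyRange_one] at hs; simp only []
          rw [if_pos hs.1]
      rw [hsum0, hsum1]
      ring
    · intro s hs
      rw [PySem.List.mem_pyRange_one] at hs
      simp only []
      rcases le_or_gt h s with hc | hc
      · rw [if_pos hc]; omega
      · rw [if_neg (by omega)]; omega

lemma total_len (w h : Int) (hw : 0 < w) (hh : 0 < h) :
    ((PySem.List.pyRange 0 (w + h - 1) 1).flatMap (diagSpec w h)).length = (w * h).toNat := by
  rw [List.length_flatMap]
  have hcast : ((List.map (fun s => (diagSpec w h s).length) (PySem.List.pyRange 0 (w + h - 1) 1)).sum : Int)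
      = ((PySem.List.pyRange 0 (w + h - 1) 1).map
          (fun s => min (h - 1) s + 1 - max 0 (s - (w - 1)))).sum := by
    rw [Nat.cast_list_sum, List.map_map]
    apply congrArg List.sum
    apply List.map_congr_left
    intro s hs
    rw [PySem.List.mem_pyRange_one] at hs
    simp only [Function.comp_apply, diagSpec, dseg]
    split_ifs <;>
      simp only [List.length_reverse, List.length_map, PySem.List.length_pyRange_one] <;>
      omega
  rw [sum_dlen w hw h (by omega)] at hcast
  omega

lemma walk_eq (w h : Int) (hw : 0 < w) (hh : 0 < h) :
    ∀ (n : Nat) (y x : Int), 0 ≤ y → y < h → 0 ≤ x → x < w →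
      n = (restAll w h y x).length →
      zigzagWalk w h n y x (decide ((y + x) % 2 = 0)) = restAll w h y x := by
  intro n
  induction n with
  | zero =>
    intro y x _ _ _ _ hlen
    have hempty : restAll w h y x = [] := List.length_eq_zero_iff.mp hlen.symm
    rw [hempty]
    rfl
  | succ n ih =>
    intro y x hy0 hyh hx0 hxw hlen
    by_cases E : (y + x) % 2 = 0
    all_goals simp only [zigzagWalk, E, decide_true, decide_false, if_true, if_false,
      Bool.false_eq_true]
    · -- even diagonal: moving up-right
      by_cases hxe : x = w - 1
      · subst hxe
        rw [if_pos rfl]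
        have hhead := restAll_head_even w h y (w - 1) E (by omega)
        rw [dseg_empty (y + (w - 1)) (by omega), List.reverse_nil, List.nil_append] at hhead
        by_cases hterm : y = h - 1
        · -- last cell of the block
          have hnil : PySem.List.pyRange (y + (w - 1) + 1) (w + h - 1) 1 = [] :=
            PySem.List.pyRange_one_eq_nil (by omega)
          rw [hnil, List.flatMap_nil] at hhead
          rw [hhead] at hlen ⊢
          obtain rfl : n = 0 := by simpa using hlen
          rfl
        · -- reflect off the right wall: next diagonal starts at (y+1, w-1)
          have hcons : PySem.List.pyRange (y + (w - 1) + 1) (w + h - 1) 1 =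
              (y + (w - 1) + 1) :: PySem.List.pyRange (y + (w - 1) + 1 + 1) (w + h - 1) 1 :=
            PySem.List.pyRange_one_cons (by omega)
          have htail : (PySem.List.pyRange (y + (w - 1) + 1) (w + h - 1) 1).flatMap (diagSpec w h)
              = restAll w h (y + 1) (w - 1) := by
            rw [hcons, List.flatMap_cons, restAll, restDiag,
                if_neg (by omega : ¬ (y + 1 + (w - 1)) % 2 = 0), diagSpec,
                if_neg (by omega : ¬ (y + (w - 1) + 1) % 2 = 0),
                dseg_congr (show max 0 (y + (w - 1) + 1 - (w - 1)) = y + 1 by omega)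
                  (show min (h - 1) (y + (w - 1) + 1) + 1 = min (h - 1) (y + 1 + (w - 1)) + 1 by omega)
                  (show y + (w - 1) + 1 = y + 1 + (w - 1) by ring),
                show y + (w - 1) + 1 + 1 = y + 1 + (w - 1) + 1 by ring]
          rw [hhead, htail] at hlen ⊢
          have hpar : decide ((y + 1 + (w - 1)) % 2 = 0) = false :=
            decide_eq_false (by omega)
          rw [← hpar, ih (y + 1) (w - 1) (by omega) (by omega) (by omega) (by omega)
            (by simpa using hlen)]
      · rw [if_neg hxe]
        by_cases hy0' : y = 0
        · subst hy0'
          rw [if_pos rfl]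
          have hhead := restAll_head_even w h 0 x E (by omega)
          rw [dseg_empty (0 + x) (by omega), List.reverse_nil, List.nil_append] at hhead
          have hcons : PySem.List.pyRange (0 + x + 1) (w + h - 1) 1 =
              (0 + x + 1) :: PySem.List.pyRange (0 + x + 1 + 1) (w + h - 1) 1 :=
            PySem.List.pyRange_one_cons (by omega)
          have htail : (PySem.List.pyRange (0 + x + 1) (w + h - 1) 1).flatMap (diagSpec w h)
              = restAll w h 0 (x + 1) := by
            rw [hcons, List.flatMap_cons, restAll, restDiag,
                if_neg (by omega : ¬ (0 + (x + 1)) % 2 = 0), diagSpec,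
                if_neg (by omega : ¬ (0 + x + 1) % 2 = 0),
                dseg_congr (show max 0 (0 + x + 1 - (w - 1)) = 0 by omega)
                  (show min (h - 1) (0 + x + 1) + 1 = min (h - 1) (0 + (x + 1)) + 1 by omega)
                  (show 0 + x + 1 = 0 + (x + 1) by ring),
                show 0 + x + 1 + 1 = 0 + (x + 1) + 1 by ring]
          rw [hhead, htail] at hlen ⊢
          have hpar : decide ((0 + (x + 1)) % 2 = 0) = false :=
            decide_eq_false (by omega)
          rw [← hpar, ih 0 (x + 1) (by omega) (by omega) (by omega) (by omega)
            (by simpa using hlen)]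
        · rw [if_neg hy0']
          -- interior step up-right
          have hhead := restAll_head_even w h y x E (by omega)
          have htail : restAll w h (y - 1) (x + 1) =
              (dseg (max 0 (y + x - (w - 1))) y (y + x)).reverse ++
                (PySem.List.pyRange (y + x + 1) (w + h - 1) 1).flatMap (diagSpec w h) := by
            rw [restAll, restDiag, if_pos (by omega : (y - 1 + (x + 1)) % 2 = 0),
                dseg_congr (show max 0 (y - 1 + (x + 1) - (w - 1)) = max 0 (y + x - (w - 1)) by omega)
                  (show y - 1 + 1 = y by ring)
                  (show y - 1 + (x + 1) = y + x by ring),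
                show y - 1 + (x + 1) + 1 = y + x + 1 by ring]
          rw [hhead, ← htail] at hlen ⊢
          have hpar : decide ((y - 1 + (x + 1)) % 2 = 0) = true :=
            decide_eq_true (by omega)
          rw [← hpar, ih (y - 1) (x + 1) (by omega) (by omega) (by omega) (by omega)
            (by simpa using hlen)]
    · -- odd diagonal: moving down-left
      by_cases hye : y = h - 1
      · subst hye
        rw [if_pos rfl]
        have hhead := restAll_head_odd w h (h - 1) x E (by omega)
        rw [dseg_empty (h - 1 + x) (by omega)] at hhead
        by_cases hterm : x = w - 1
        · subst hterm
          have hnil : PySem.List.pyRange (h - 1 + (w - 1) + 1) (w + h - 1) 1 = [] :=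
            PySem.List.pyRange_one_eq_nil (by omega)
          rw [hnil, List.flatMap_nil] at hhead
          rw [hhead] at hlen ⊢
          obtain rfl : n = 0 := by simpa using hlen
          rfl
        · -- reflect off the bottom wall: next diagonal starts at (h-1, x+1)
          have hcons : PySem.List.pyRange (h - 1 + x + 1) (w + h - 1) 1 =
              (h - 1 + x + 1) :: PySem.List.pyRange (h - 1 + x + 1 + 1) (w + h - 1) 1 :=
            PySem.List.pyRange_one_cons (by omega)
          have htail : [] ++ (PySem.List.pyRange (h - 1 + x + 1) (w + h - 1) 1).flatMap (diagSpec w h)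
              = restAll w h (h - 1) (x + 1) := by
            rw [List.nil_append, hcons, List.flatMap_cons, restAll, restDiag,
                if_pos (by omega : (h - 1 + (x + 1)) % 2 = 0), diagSpec,
                if_pos (by omega : (h - 1 + x + 1) % 2 = 0),
                dseg_congr (show max 0 (h - 1 + x + 1 - (w - 1)) = max 0 (h - 1 + (x + 1) - (w - 1)) by omega)
                  (show min (h - 1) (h - 1 + x + 1) + 1 = h - 1 + 1 by omega)
                  (show h - 1 + x + 1 = h - 1 + (x + 1) by ring),
                show h - 1 + x + 1 + 1 = h - 1 + (x + 1) + 1 by ring]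
          rw [hhead, htail] at hlen ⊢
          have hpar : decide ((h - 1 + (x + 1)) % 2 = 0) = true :=
            decide_eq_true (by omega)
          rw [← hpar, ih (h - 1) (x + 1) (by omega) (by omega) (by omega) (by omega)
            (by simpa using hlen)]
      · rw [if_neg hye]
        by_cases hx0' : x = 0
        · subst hx0'
          rw [if_pos rfl]
          have hhead := restAll_head_odd w h y 0 E (by omega)
          rw [dseg_empty (y + 0) (by omega)] at hhead
          have hcons : PySem.List.pyRange (y + 0 + 1) (w + h - 1) 1 =
              (y + 0 + 1) :: PySem.List.pyRange (y + 0 + 1 + 1) (w + h - 1) 1 :=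
            PySem.List.pyRange_one_cons (by omega)
          have htail : [] ++ (PySem.List.pyRange (y + 0 + 1) (w + h - 1) 1).flatMap (diagSpec w h)
              = restAll w h (y + 1) 0 := by
            rw [List.nil_append, hcons, List.flatMap_cons, restAll, restDiag,
                if_pos (by omega : (y + 1 + 0) % 2 = 0), diagSpec,
                if_pos (by omega : (y + 0 + 1) % 2 = 0),
                dseg_congr (show max 0 (y + 0 + 1 - (w - 1)) = max 0 (y + 1 + 0 - (w - 1)) by omega)
                  (show min (h - 1) (y + 0 + 1) + 1 = y + 1 + 1 by omega)
                  (show y + 0 + 1 = y + 1 + 0 by ring),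
                show y + 0 + 1 + 1 = y + 1 + 0 + 1 by ring]
          rw [hhead, htail] at hlen ⊢
          have hpar : decide ((y + 1 + 0) % 2 = 0) = true :=
            decide_eq_true (by omega)
          rw [← hpar, ih (y + 1) 0 (by omega) (by omega) (by omega) (by omega)
            (by simpa using hlen)]
        · rw [if_neg hx0']
          -- interior step down-left
          have hhead := restAll_head_odd w h y x E (by omega)
          have htail : restAll w h (y + 1) (x - 1) =
              dseg (y + 1) (min (h - 1) (y + x) + 1) (y + x) ++
                (PySem.List.pyRange (y + x + 1) (w + h - 1) 1).flatMap (diagSpec w h) := by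
            rw [restAll, restDiag, if_neg (by omega : ¬ (y + 1 + (x - 1)) % 2 = 0),
                dseg_congr (rfl : y + 1 = y + 1)
                  (show min (h - 1) (y + 1 + (x - 1)) + 1 = min (h - 1) (y + x) + 1 by omega)
                  (show y + 1 + (x - 1) = y + x by ring),
                show y + 1 + (x - 1) + 1 = y + x + 1 by ring]
          rw [hhead, ← htail] at hlen ⊢
          have hpar : decide ((y + 1 + (x - 1)) % 2 = 0) = false :=
            decide_eq_false (by omega)
          rw [← hpar, ih (y + 1) (x - 1) (by omega) (by omega) (by omega) (by omega)
            (by simpa using hlen)]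

-- ===== VERDICT (by name: the statement is the Claim_ definition above) =====
theorem zigzag_coords_for_block_spec : Claim_equal_zigzag_coords_for_block := by
  intro w h _
  unfold Spec_zigzag_coords_for_block zigzag_coords_for_block_alt
  by_cases hd : w ≤ 0 ∨ h ≤ 0
  · simp only [hd, if_true]
    rw [A_eq_flatMap, flatMap_nil_of_degenerate w h hd]
  · rw [if_neg hd]
    have hw : 0 < w := by omega
    have hh : 0 < h := by omega
    have h01 : (0:Int) < w + h - 1 := by omega
    have hA : zigzag_coords_for_block w h = restAll w h 0 0 := by
      rw [A_eq_flatMap, restAll]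
      rw [PySem.List.pyRange_one_cons h01, List.flatMap_cons]
      have h0 : diagSpec w h 0 = restDiag w h 0 0 := by
        rw [diagSpec, restDiag, if_pos (by omega : (0:Int) % 2 = 0),
            if_pos (by omega : ((0:Int) + 0) % 2 = 0),
            dseg_congr (show max 0 (0 - (w - 1)) = max 0 (0 + 0 - (w - 1)) by omega)
              (show min (h - 1) 0 + 1 = 0 + 1 by omega)
              (show (0:Int) = 0 + 0 by ring)]
      rw [h0]
      norm_num
    have hlen : (w * h).toNat = (restAll w h 0 0).length := by
      rw [← hA, A_eq_flatMap, total_len w h hw hh]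
    have hwalk := walk_eq w h hw hh (w * h).toNat 0 0 le_rfl hh le_rfl hw hlen
    simp only [show ((0:Int) + 0) % 2 = 0 by norm_num, decide_true] at hwalk
    rw [hA, hwalk]
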